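-- pv_equiv track=rewrite | github.com/nnivog/MPCP | app.py | norm_month
-- ===== SOURCE A (Python) =====
-- BS_MONTHS = ['Baisakh','Jestha','Ashadh','Shrawan','Bhadra','Ashwin',
--              'Kartik','Mangsir','Poush','Magh','Falgun','Chaitra']
--
-- AD_TO_BS={
--     'Jul':'Shrawan','Aug':'Bhadra','Sep':'Ashwin','Oct':'Kartik','Nov':'Mangsir','Dec':'Poush',
--     'Jan':'Magh','Feb':'Falgun','Mar':'Chaitra','Apr':'Baisakh','May':'Jestha','Jun':'Ashadh',
--     'July':'Shrawan','August':'Bhadra','September':'Ashwin','October':'Kartik',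
--     'November':'Mangsir','December':'Poush','January':'Magh','February':'Falgun',
--     'March':'Chaitra','April':'Baisakh','June':'Ashadh'}
--
-- def norm_month(m):
--     m=str(m or '').strip()
--     if m in BS_MONTHS: return m
--     if m in AD_TO_BS: return AD_TO_BS[m]
--     for bs in BS_MONTHS:
--         if m.lower()==bs.lower(): return bs
--     for ad,bs in AD_TO_BS.items():
--         if m.lower()==ad.lower(): return bs
--     try:
--         idx=int(m)-1
--         if 0<=idx<12: return BS_MONTHS[idx]
--     except: pass
--     return m or 'Shrawan'
-- ===== SOURCE B (Python) =====
-- BS_MONTHS = ['Baisakh','Jestha','Ashadh','Shrawan','Bhadra','Ashwin',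
--              'Kartik','Mangsir','Poush','Magh','Falgun','Chaitra']
--
-- AD_FULL = ['January','February','March','April','May','June',
--            'July','August','September','October','November','December']
--
-- def norm_month(m):
--     # One case-insensitive pass over each name list; the 23-entry AD->BS string
--     # table is replaced by calendar arithmetic: English month i (matched by its
--     # full name or its 3-letter abbreviation) starts in BS month (i+9)%12.
--     m = str(m or '').strip()
--     low = m.lower()
--     for name in BS_MONTHS:
--         if low == name.lower():
--             return name
--     for i, full in enumerate(AD_FULL):
--         f = full.lower()
--         if low == f or low == f[:3]:
--             return BS_MONTHS[(i + 9) % 12]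
--     try:
--         idx = int(m) - 1
--         if 0 <= idx < 12:
--             return BS_MONTHS[idx]
--     except:
--         pass
--     return m or 'Shrawan'
-- ===== Notes on version B (the rewrite author's own statement) =====
-- stated objective: alternative
-- what changed: A's four sequential passes over a 12-name list and a 23-entry AD->BS string table are replaced by a single case-insensitive scan per name list plus calendar arithmetic: an English month matched by its full name or 3-letter abbreviation at position i maps to BS_MONTHS[(i+9)%12], so the hand-written AD_TO_BS table disappears entirely.
import Mathlib
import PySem

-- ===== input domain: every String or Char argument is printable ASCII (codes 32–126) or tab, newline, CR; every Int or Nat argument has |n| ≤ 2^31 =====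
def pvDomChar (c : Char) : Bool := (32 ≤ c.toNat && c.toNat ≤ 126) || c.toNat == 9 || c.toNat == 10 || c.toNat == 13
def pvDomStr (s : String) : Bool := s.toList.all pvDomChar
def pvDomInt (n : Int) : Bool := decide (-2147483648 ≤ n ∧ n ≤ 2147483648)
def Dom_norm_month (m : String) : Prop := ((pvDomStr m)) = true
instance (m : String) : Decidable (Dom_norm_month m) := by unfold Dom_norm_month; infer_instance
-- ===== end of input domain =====

-- B drops A's hand-written 23-entry AD->BS table: one case-insensitive scan per name list, and an
-- English month at position i (full name or 3-letter abbreviation) maps to BS_MONTHS[(i+9)%12]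
-- by calendar arithmetic (objective: alternative); return values agree on every input.

-- ===== PORT A =====
def BS_MONTHS : List String := ["Baisakh","Jestha","Ashadh","Shrawan","Bhadra","Ashwin","Kartik","Mangsir","Poush","Magh","Falgun","Chaitra"]

def AD_TO_BS : PySem.Dict String String := PySem.Dict.ofList [("Jul", "Shrawan"),("Aug", "Bhadra"),("Sep", "Ashwin"),("Oct", "Kartik"),("Nov", "Mangsir"),("Dec", "Poush"),("Jan", "Magh"),("Feb", "Falgun"),("Mar", "Chaitra"),("Apr", "Baisakh"),("May", "Jestha"),("Jun", "Ashadh"),("July", "Shrawan"),("August", "Bhadra"),("September", "Ashwin"),("October", "Kartik"),("November", "Mangsir"),("December", "Poush"),("January", "Magh"),("February", "Falgun"),("March", "Chaitra"),("April", "Baisakh"),("June", "Ashadh")]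

def norm_month (m : String) : String :=
  -- m = str(m or '').strip()  (for a string argument, `m or ''` is m itself)
  let m := PySem.Str.strip m
  if m ∈ BS_MONTHS then m
  else if AD_TO_BS.contains m then AD_TO_BS.getD m ""   -- AD_TO_BS[m]; key present, so getD's default is never used
  else match BS_MONTHS.find? (fun bs => PySem.Str.lower m == PySem.Str.lower bs) with
  | some bs => bs
  | none => match AD_TO_BS.items.find? (fun p => PySem.Str.lower m == PySem.Str.lower p.1) with
    | some p => p.2
    | none =>
      match PySem.Int.ofStr? m with   -- try: int(m); except → fall through
      | some n =>
        if 0 ≤ n - 1 ∧ n - 1 < 12 then PySem.List.pyGetD BS_MONTHS (n - 1) ""   -- index guarded in range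
        else if m = "" then "Shrawan" else m
      | none => if m = "" then "Shrawan" else m

-- ===== PORT B =====
def AD_FULL : List String := ["January","February","March","April","May","June","July","August","September","October","November","December"]

def norm_month_alt (m : String) : String :=
  let m := PySem.Str.strip m
  let low := PySem.Str.lower m
  -- for name in BS_MONTHS: if low == name.lower(): return name
  match BS_MONTHS.find? (fun name => low == PySem.Str.lower name) with
  | some name => name
  | none =>
    -- for i, full in enumerate(AD_FULL): f = full.lower(); if low == f or low == f[:3]: return BS_MONTHS[(i+9)%12]
    match (PySem.List.enumerate AD_FULL 0).find? (fun p =>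
        low == PySem.Str.lower p.2 || low == PySem.Str.slice (PySem.Str.lower p.2) none (some 3)) with
    | some p => PySem.List.pyGetD BS_MONTHS (PySem.Int.mod (p.1 + 9) 12) ""   -- i+9 ≥ 0, so Python's % is Int.mod
    | none =>
      match PySem.Int.ofStr? m with   -- try: int(m); except → pass
      | some n =>
        if 0 ≤ n - 1 ∧ n - 1 < 12 then PySem.List.pyGetD BS_MONTHS (n - 1) ""
        else if m = "" then "Shrawan" else m
      | none => if m = "" then "Shrawan" else m

-- ===== PRECONDITION & SPEC =====
def Spec_norm_month (m : String) (out : String) : Prop := out = norm_month_alt m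
instance (m : String) (out : String) : Decidable (Spec_norm_month m out) := by unfold Spec_norm_month; infer_instance

-- ===== CLAIM (what is proved, stated in full; the proofs are below) =====
def Claim_equal_norm_month : Prop := ∀ (m : String), Dom_norm_month m → Spec_norm_month m (norm_month m)

-- ===== LEMMAS AND PROOFS =====

set_option maxRecDepth 4096 in
theorem lowBS0 : PySem.Str.lower "Baisakh" = "baisakh" := by decide
set_option maxRecDepth 4096 in
theorem lowBS1 : PySem.Str.lower "Jestha" = "jestha" := by decide
set_option maxRecDepth 4096 in
theorem lowBS2 : PySem.Str.lower "Ashadh" = "ashadh" := by decide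
set_option maxRecDepth 4096 in
theorem lowBS3 : PySem.Str.lower "Shrawan" = "shrawan" := by decide
set_option maxRecDepth 4096 in
theorem lowBS4 : PySem.Str.lower "Bhadra" = "bhadra" := by decide
set_option maxRecDepth 4096 in
theorem lowBS5 : PySem.Str.lower "Ashwin" = "ashwin" := by decide
set_option maxRecDepth 4096 in
theorem lowBS6 : PySem.Str.lower "Kartik" = "kartik" := by decide
set_option maxRecDepth 4096 in
theorem lowBS7 : PySem.Str.lower "Mangsir" = "mangsir" := by decide
set_option maxRecDepth 4096 in
theorem lowBS8 : PySem.Str.lower "Poush" = "poush" := by decide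
set_option maxRecDepth 4096 in
theorem lowBS9 : PySem.Str.lower "Magh" = "magh" := by decide
set_option maxRecDepth 4096 in
theorem lowBS10 : PySem.Str.lower "Falgun" = "falgun" := by decide
set_option maxRecDepth 4096 in
theorem lowBS11 : PySem.Str.lower "Chaitra" = "chaitra" := by decide
set_option maxRecDepth 4096 in
theorem lowAD0 : PySem.Str.lower "Jul" = "jul" := by decide
set_option maxRecDepth 4096 in
theorem lowAD1 : PySem.Str.lower "Aug" = "aug" := by decide
set_option maxRecDepth 4096 in
theorem lowAD2 : PySem.Str.lower "Sep" = "sep" := by decide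
set_option maxRecDepth 4096 in
theorem lowAD3 : PySem.Str.lower "Oct" = "oct" := by decide
set_option maxRecDepth 4096 in
theorem lowAD4 : PySem.Str.lower "Nov" = "nov" := by decide
set_option maxRecDepth 4096 in
theorem lowAD5 : PySem.Str.lower "Dec" = "dec" := by decide
set_option maxRecDepth 4096 in
theorem lowAD6 : PySem.Str.lower "Jan" = "jan" := by decide
set_option maxRecDepth 4096 in
theorem lowAD7 : PySem.Str.lower "Feb" = "feb" := by decide
set_option maxRecDepth 4096 in
theorem lowAD8 : PySem.Str.lower "Mar" = "mar" := by decide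
set_option maxRecDepth 4096 in
theorem lowAD9 : PySem.Str.lower "Apr" = "apr" := by decide
set_option maxRecDepth 4096 in
theorem lowAD10 : PySem.Str.lower "May" = "may" := by decide
set_option maxRecDepth 4096 in
theorem lowAD11 : PySem.Str.lower "Jun" = "jun" := by decide
set_option maxRecDepth 4096 in
theorem lowAD12 : PySem.Str.lower "July" = "july" := by decide
set_option maxRecDepth 4096 in
theorem lowAD13 : PySem.Str.lower "August" = "august" := by decide
set_option maxRecDepth 4096 in
theorem lowAD14 : PySem.Str.lower "September" = "september" := by decide
set_option maxRecDepth 4096 in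
theorem lowAD15 : PySem.Str.lower "October" = "october" := by decide
set_option maxRecDepth 4096 in
theorem lowAD16 : PySem.Str.lower "November" = "november" := by decide
set_option maxRecDepth 4096 in
theorem lowAD17 : PySem.Str.lower "December" = "december" := by decide
set_option maxRecDepth 4096 in
theorem lowAD18 : PySem.Str.lower "January" = "january" := by decide
set_option maxRecDepth 4096 in
theorem lowAD19 : PySem.Str.lower "February" = "february" := by decide
set_option maxRecDepth 4096 in
theorem lowAD20 : PySem.Str.lower "March" = "march" := by decide
set_option maxRecDepth 4096 in
theorem lowAD21 : PySem.Str.lower "April" = "april" := by decide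
set_option maxRecDepth 4096 in
theorem lowAD22 : PySem.Str.lower "June" = "june" := by decide

set_option maxRecDepth 65536 in
set_option maxHeartbeats 8000000 in
theorem core_eq (s : String) :
    (if s ∈ BS_MONTHS then s
     else if AD_TO_BS.contains s then AD_TO_BS.getD s ""
     else match BS_MONTHS.find? (fun bs => PySem.Str.lower s == PySem.Str.lower bs) with
     | some bs => bs
     | none => match AD_TO_BS.items.find? (fun p => PySem.Str.lower s == PySem.Str.lower p.1) with
       | some p => p.2
       | none =>
         match PySem.Int.ofStr? s with
         | some n =>
           if 0 ≤ n - 1 ∧ n - 1 < 12 then PySem.List.pyGetD BS_MONTHS (n - 1) ""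
           else if s = "" then "Shrawan" else s
         | none => if s = "" then "Shrawan" else s)
    =
    (match BS_MONTHS.find? (fun name => PySem.Str.lower s == PySem.Str.lower name) with
     | some name => name
     | none =>
       match (PySem.List.enumerate AD_FULL 0).find? (fun p =>
           PySem.Str.lower s == PySem.Str.lower p.2 ||
           PySem.Str.lower s == PySem.Str.slice (PySem.Str.lower p.2) none (some 3)) with
       | some p => PySem.List.pyGetD BS_MONTHS (PySem.Int.mod (p.1 + 9) 12) ""
       | none =>
         match PySem.Int.ofStr? s with
         | some n =>
           if 0 ≤ n - 1 ∧ n - 1 < 12 then PySem.List.pyGetD BS_MONTHS (n - 1) ""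
           else if s = "" then "Shrawan" else s
         | none => if s = "" then "Shrawan" else s) := by
  by_cases hbs : s ∈ BS_MONTHS
  · simp only [BS_MONTHS, List.mem_cons, List.not_mem_nil, or_false] at hbs
    rcases hbs with rfl|rfl|rfl|rfl|rfl|rfl|rfl|rfl|rfl|rfl|rfl|rfl
    all_goals decide
  · by_cases had : AD_TO_BS.contains s
    · have hk : s ∈ AD_TO_BS.keys := (PySem.Dict.contains_iff_mem_keys AD_TO_BS s).mp had
      rw [show AD_TO_BS.keys = ["Jul","Aug","Sep","Oct","Nov","Dec","Jan","Feb","Mar","Apr","May","Jun","July","August","September","October","November","December","January","February","March","April","June"] from by decide] at hk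
      simp only [List.mem_cons, List.not_mem_nil, or_false] at hk
      rcases hk with rfl|rfl|rfl|rfl|rfl|rfl|rfl|rfl|rfl|rfl|rfl|rfl|rfl|rfl|rfl|rfl|rfl|rfl|rfl|rfl|rfl|rfl|rfl
      all_goals decide
    · by_cases hlow : PySem.Str.lower s ∈ ["baisakh","jestha","ashadh","shrawan","bhadra","ashwin","kartik","mangsir","poush","magh","falgun","chaitra","jul","aug","sep","oct","nov","dec","jan","feb","mar","apr","may","jun","july","august","september","october","november","december","january","february","march","april","june"]
      · simp only [List.mem_cons, List.not_mem_nil, or_false] at hlow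
        rw [if_neg hbs, if_neg had]
        rcases hlow with h|h|h|h|h|h|h|h|h|h|h|h|h|h|h|h|h|h|h|h|h|h|h|h|h|h|h|h|h|h|h|h|h|h|h
        · simp only [h]
          rw [show BS_MONTHS.find? (fun bs => ("baisakh" : String) == PySem.Str.lower bs) = some "Baisakh" from by decide]
        · simp only [h]
          rw [show BS_MONTHS.find? (fun bs => ("jestha" : String) == PySem.Str.lower bs) = some "Jestha" from by decide]
        · simp only [h]
          rw [show BS_MONTHS.find? (fun bs => ("ashadh" : String) == PySem.Str.lower bs) = some "Ashadh" from by decide]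
        · simp only [h]
          rw [show BS_MONTHS.find? (fun bs => ("shrawan" : String) == PySem.Str.lower bs) = some "Shrawan" from by decide]
        · simp only [h]
          rw [show BS_MONTHS.find? (fun bs => ("bhadra" : String) == PySem.Str.lower bs) = some "Bhadra" from by decide]
        · simp only [h]
          rw [show BS_MONTHS.find? (fun bs => ("ashwin" : String) == PySem.Str.lower bs) = some "Ashwin" from by decide]
        · simp only [h]
          rw [show BS_MONTHS.find? (fun bs => ("kartik" : String) == PySem.Str.lower bs) = some "Kartik" from by decide]
        · simp only [h]
          rw [show BS_MONTHS.find? (fun bs => ("mangsir" : String) == PySem.Str.lower bs) = some "Mangsir" from by decide]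
        · simp only [h]
          rw [show BS_MONTHS.find? (fun bs => ("poush" : String) == PySem.Str.lower bs) = some "Poush" from by decide]
        · simp only [h]
          rw [show BS_MONTHS.find? (fun bs => ("magh" : String) == PySem.Str.lower bs) = some "Magh" from by decide]
        · simp only [h]
          rw [show BS_MONTHS.find? (fun bs => ("falgun" : String) == PySem.Str.lower bs) = some "Falgun" from by decide]
        · simp only [h]
          rw [show BS_MONTHS.find? (fun bs => ("chaitra" : String) == PySem.Str.lower bs) = some "Chaitra" from by decide]
        · simp only [h]
          rw [show BS_MONTHS.find? (fun bs => ("jul" : String) == PySem.Str.lower bs) = none from by decide,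
              show AD_TO_BS.items.find? (fun p => ("jul" : String) == PySem.Str.lower p.1) = some ("Jul", "Shrawan") from by decide,
              show (PySem.List.enumerate AD_FULL 0).find? (fun p => ("jul" : String) == PySem.Str.lower p.2 || ("jul" : String) == PySem.Str.slice (PySem.Str.lower p.2) none (some 3)) = some ((6 : Int), "July") from by decide]
          rfl
        · simp only [h]
          rw [show BS_MONTHS.find? (fun bs => ("aug" : String) == PySem.Str.lower bs) = none from by decide,
              show AD_TO_BS.items.find? (fun p => ("aug" : String) == PySem.Str.lower p.1) = some ("Aug", "Bhadra") from by decide,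
              show (PySem.List.enumerate AD_FULL 0).find? (fun p => ("aug" : String) == PySem.Str.lower p.2 || ("aug" : String) == PySem.Str.slice (PySem.Str.lower p.2) none (some 3)) = some ((7 : Int), "August") from by decide]
          rfl
        · simp only [h]
          rw [show BS_MONTHS.find? (fun bs => ("sep" : String) == PySem.Str.lower bs) = none from by decide,
              show AD_TO_BS.items.find? (fun p => ("sep" : String) == PySem.Str.lower p.1) = some ("Sep", "Ashwin") from by decide,
              show (PySem.List.enumerate AD_FULL 0).find? (fun p => ("sep" : String) == PySem.Str.lower p.2 || ("sep" : String) == PySem.Str.slice (PySem.Str.lower p.2) none (some 3)) = some ((8 : Int), "September") from by decide]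
          rfl
        · simp only [h]
          rw [show BS_MONTHS.find? (fun bs => ("oct" : String) == PySem.Str.lower bs) = none from by decide,
              show AD_TO_BS.items.find? (fun p => ("oct" : String) == PySem.Str.lower p.1) = some ("Oct", "Kartik") from by decide,
              show (PySem.List.enumerate AD_FULL 0).find? (fun p => ("oct" : String) == PySem.Str.lower p.2 || ("oct" : String) == PySem.Str.slice (PySem.Str.lower p.2) none (some 3)) = some ((9 : Int), "October") from by decide]
          rfl
        · simp only [h]
          rw [show BS_MONTHS.find? (fun bs => ("nov" : String) == PySem.Str.lower bs) = none from by decide,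
              show AD_TO_BS.items.find? (fun p => ("nov" : String) == PySem.Str.lower p.1) = some ("Nov", "Mangsir") from by decide,
              show (PySem.List.enumerate AD_FULL 0).find? (fun p => ("nov" : String) == PySem.Str.lower p.2 || ("nov" : String) == PySem.Str.slice (PySem.Str.lower p.2) none (some 3)) = some ((10 : Int), "November") from by decide]
          rfl
        · simp only [h]
          rw [show BS_MONTHS.find? (fun bs => ("dec" : String) == PySem.Str.lower bs) = none from by decide,
              show AD_TO_BS.items.find? (fun p => ("dec" : String) == PySem.Str.lower p.1) = some ("Dec", "Poush") from by decide,
              show (PySem.List.enumerate AD_FULL 0).find? (fun p => ("dec" : String) == PySem.Str.lower p.2 || ("dec" : String) == PySem.Str.slice (PySem.Str.lower p.2) none (some 3)) = some ((11 : Int), "December") from by decide]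
          rfl
        · simp only [h]
          rw [show BS_MONTHS.find? (fun bs => ("jan" : String) == PySem.Str.lower bs) = none from by decide,
              show AD_TO_BS.items.find? (fun p => ("jan" : String) == PySem.Str.lower p.1) = some ("Jan", "Magh") from by decide,
              show (PySem.List.enumerate AD_FULL 0).find? (fun p => ("jan" : String) == PySem.Str.lower p.2 || ("jan" : String) == PySem.Str.slice (PySem.Str.lower p.2) none (some 3)) = some ((0 : Int), "January") from by decide]
          rfl
        · simp only [h]
          rw [show BS_MONTHS.find? (fun bs => ("feb" : String) == PySem.Str.lower bs) = none from by decide,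
              show AD_TO_BS.items.find? (fun p => ("feb" : String) == PySem.Str.lower p.1) = some ("Feb", "Falgun") from by decide,
              show (PySem.List.enumerate AD_FULL 0).find? (fun p => ("feb" : String) == PySem.Str.lower p.2 || ("feb" : String) == PySem.Str.slice (PySem.Str.lower p.2) none (some 3)) = some ((1 : Int), "February") from by decide]
          rfl
        · simp only [h]
          rw [show BS_MONTHS.find? (fun bs => ("mar" : String) == PySem.Str.lower bs) = none from by decide,
              show AD_TO_BS.items.find? (fun p => ("mar" : String) == PySem.Str.lower p.1) = some ("Mar", "Chaitra") from by decide,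
              show (PySem.List.enumerate AD_FULL 0).find? (fun p => ("mar" : String) == PySem.Str.lower p.2 || ("mar" : String) == PySem.Str.slice (PySem.Str.lower p.2) none (some 3)) = some ((2 : Int), "March") from by decide]
          rfl
        · simp only [h]
          rw [show BS_MONTHS.find? (fun bs => ("apr" : String) == PySem.Str.lower bs) = none from by decide,
              show AD_TO_BS.items.find? (fun p => ("apr" : String) == PySem.Str.lower p.1) = some ("Apr", "Baisakh") from by decide,
              show (PySem.List.enumerate AD_FULL 0).find? (fun p => ("apr" : String) == PySem.Str.lower p.2 || ("apr" : String) == PySem.Str.slice (PySem.Str.lower p.2) none (some 3)) = some ((3 : Int), "April") from by decide]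
          rfl
        · simp only [h]
          rw [show BS_MONTHS.find? (fun bs => ("may" : String) == PySem.Str.lower bs) = none from by decide,
              show AD_TO_BS.items.find? (fun p => ("may" : String) == PySem.Str.lower p.1) = some ("May", "Jestha") from by decide,
              show (PySem.List.enumerate AD_FULL 0).find? (fun p => ("may" : String) == PySem.Str.lower p.2 || ("may" : String) == PySem.Str.slice (PySem.Str.lower p.2) none (some 3)) = some ((4 : Int), "May") from by decide]
          rfl
        · simp only [h]
          rw [show BS_MONTHS.find? (fun bs => ("jun" : String) == PySem.Str.lower bs) = none from by decide,
              show AD_TO_BS.items.find? (fun p => ("jun" : String) == PySem.Str.lower p.1) = some ("Jun", "Ashadh") from by decide,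
              show (PySem.List.enumerate AD_FULL 0).find? (fun p => ("jun" : String) == PySem.Str.lower p.2 || ("jun" : String) == PySem.Str.slice (PySem.Str.lower p.2) none (some 3)) = some ((5 : Int), "June") from by decide]
          rfl
        · simp only [h]
          rw [show BS_MONTHS.find? (fun bs => ("july" : String) == PySem.Str.lower bs) = none from by decide,
              show AD_TO_BS.items.find? (fun p => ("july" : String) == PySem.Str.lower p.1) = some ("July", "Shrawan") from by decide,
              show (PySem.List.enumerate AD_FULL 0).find? (fun p => ("july" : String) == PySem.Str.lower p.2 || ("july" : String) == PySem.Str.slice (PySem.Str.lower p.2) none (some 3)) = some ((6 : Int), "July") from by decide]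
          rfl
        · simp only [h]
          rw [show BS_MONTHS.find? (fun bs => ("august" : String) == PySem.Str.lower bs) = none from by decide,
              show AD_TO_BS.items.find? (fun p => ("august" : String) == PySem.Str.lower p.1) = some ("August", "Bhadra") from by decide,
              show (PySem.List.enumerate AD_FULL 0).find? (fun p => ("august" : String) == PySem.Str.lower p.2 || ("august" : String) == PySem.Str.slice (PySem.Str.lower p.2) none (some 3)) = some ((7 : Int), "August") from by decide]
          rfl
        · simp only [h]
          rw [show BS_MONTHS.find? (fun bs => ("september" : String) == PySem.Str.lower bs) = none from by decide,
              show AD_TO_BS.items.find? (fun p => ("september" : String) == PySem.Str.lower p.1) = some ("September", "Ashwin") from by decide,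
              show (PySem.List.enumerate AD_FULL 0).find? (fun p => ("september" : String) == PySem.Str.lower p.2 || ("september" : String) == PySem.Str.slice (PySem.Str.lower p.2) none (some 3)) = some ((8 : Int), "September") from by decide]
          rfl
        · simp only [h]
          rw [show BS_MONTHS.find? (fun bs => ("october" : String) == PySem.Str.lower bs) = none from by decide,
              show AD_TO_BS.items.find? (fun p => ("october" : String) == PySem.Str.lower p.1) = some ("October", "Kartik") from by decide,
              show (PySem.List.enumerate AD_FULL 0).find? (fun p => ("october" : String) == PySem.Str.lower p.2 || ("october" : String) == PySem.Str.slice (PySem.Str.lower p.2) none (some 3)) = some ((9 : Int), "October") from by decide]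
          rfl
        · simp only [h]
          rw [show BS_MONTHS.find? (fun bs => ("november" : String) == PySem.Str.lower bs) = none from by decide,
              show AD_TO_BS.items.find? (fun p => ("november" : String) == PySem.Str.lower p.1) = some ("November", "Mangsir") from by decide,
              show (PySem.List.enumerate AD_FULL 0).find? (fun p => ("november" : String) == PySem.Str.lower p.2 || ("november" : String) == PySem.Str.slice (PySem.Str.lower p.2) none (some 3)) = some ((10 : Int), "November") from by decide]
          rfl
        · simp only [h]
          rw [show BS_MONTHS.find? (fun bs => ("december" : String) == PySem.Str.lower bs) = none from by decide,
              show AD_TO_BS.items.find? (fun p => ("december" : String) == PySem.Str.lower p.1) = some ("December", "Poush") from by decide,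
              show (PySem.List.enumerate AD_FULL 0).find? (fun p => ("december" : String) == PySem.Str.lower p.2 || ("december" : String) == PySem.Str.slice (PySem.Str.lower p.2) none (some 3)) = some ((11 : Int), "December") from by decide]
          rfl
        · simp only [h]
          rw [show BS_MONTHS.find? (fun bs => ("january" : String) == PySem.Str.lower bs) = none from by decide,
              show AD_TO_BS.items.find? (fun p => ("january" : String) == PySem.Str.lower p.1) = some ("January", "Magh") from by decide,
              show (PySem.List.enumerate AD_FULL 0).find? (fun p => ("january" : String) == PySem.Str.lower p.2 || ("january" : String) == PySem.Str.slice (PySem.Str.lower p.2) none (some 3)) = some ((0 : Int), "January") from by decide]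
          rfl
        · simp only [h]
          rw [show BS_MONTHS.find? (fun bs => ("february" : String) == PySem.Str.lower bs) = none from by decide,
              show AD_TO_BS.items.find? (fun p => ("february" : String) == PySem.Str.lower p.1) = some ("February", "Falgun") from by decide,
              show (PySem.List.enumerate AD_FULL 0).find? (fun p => ("february" : String) == PySem.Str.lower p.2 || ("february" : String) == PySem.Str.slice (PySem.Str.lower p.2) none (some 3)) = some ((1 : Int), "February") from by decide]
          rfl
        · simp only [h]
          rw [show BS_MONTHS.find? (fun bs => ("march" : String) == PySem.Str.lower bs) = none from by decide,
              show AD_TO_BS.items.find? (fun p => ("march" : String) == PySem.Str.lower p.1) = some ("March", "Chaitra") from by decide,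
              show (PySem.List.enumerate AD_FULL 0).find? (fun p => ("march" : String) == PySem.Str.lower p.2 || ("march" : String) == PySem.Str.slice (PySem.Str.lower p.2) none (some 3)) = some ((2 : Int), "March") from by decide]
          rfl
        · simp only [h]
          rw [show BS_MONTHS.find? (fun bs => ("april" : String) == PySem.Str.lower bs) = none from by decide,
              show AD_TO_BS.items.find? (fun p => ("april" : String) == PySem.Str.lower p.1) = some ("April", "Baisakh") from by decide,
              show (PySem.List.enumerate AD_FULL 0).find? (fun p => ("april" : String) == PySem.Str.lower p.2 || ("april" : String) == PySem.Str.slice (PySem.Str.lower p.2) none (some 3)) = some ((3 : Int), "April") from by decide]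
          rfl
        · simp only [h]
          rw [show BS_MONTHS.find? (fun bs => ("june" : String) == PySem.Str.lower bs) = none from by decide,
              show AD_TO_BS.items.find? (fun p => ("june" : String) == PySem.Str.lower p.1) = some ("June", "Ashadh") from by decide,
              show (PySem.List.enumerate AD_FULL 0).find? (fun p => ("june" : String) == PySem.Str.lower p.2 || ("june" : String) == PySem.Str.slice (PySem.Str.lower p.2) none (some 3)) = some ((5 : Int), "June") from by decide]
          rfl
      · rw [if_neg hbs, if_neg had]
        simp only [List.mem_cons, List.not_mem_nil, or_false, not_or] at hlow
        obtain ⟨h0, h1, h2, h3, h4, h5, h6, h7, h8, h9, h10, h11, h12, h13, h14, h15, h16, h17, h18, h19, h20, h21, h22, h23, h24, h25, h26, h27, h28, h29, h30, h31, h32, h33, h34⟩ := hlow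
        have hf1 : BS_MONTHS.find? (fun bs => PySem.Str.lower s == PySem.Str.lower bs) = none := by
          rw [List.find?_eq_none]
          intro x hx
          fin_cases hx
          · rw [lowBS0]; simpa using h0
          · rw [lowBS1]; simpa using h1
          · rw [lowBS2]; simpa using h2
          · rw [lowBS3]; simpa using h3
          · rw [lowBS4]; simpa using h4
          · rw [lowBS5]; simpa using h5
          · rw [lowBS6]; simpa using h6
          · rw [lowBS7]; simpa using h7
          · rw [lowBS8]; simpa using h8
          · rw [lowBS9]; simpa using h9
          · rw [lowBS10]; simpa using h10
          · rw [lowBS11]; simpa using h11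
        have hf2 : AD_TO_BS.items.find? (fun p => PySem.Str.lower s == PySem.Str.lower p.1) = none := by
          rw [show AD_TO_BS.items = [("Jul", "Shrawan"),("Aug", "Bhadra"),("Sep", "Ashwin"),("Oct", "Kartik"),("Nov", "Mangsir"),("Dec", "Poush"),("Jan", "Magh"),("Feb", "Falgun"),("Mar", "Chaitra"),("Apr", "Baisakh"),("May", "Jestha"),("Jun", "Ashadh"),("July", "Shrawan"),("August", "Bhadra"),("September", "Ashwin"),("October", "Kartik"),("November", "Mangsir"),("December", "Poush"),("January", "Magh"),("February", "Falgun"),("March", "Chaitra"),("April", "Baisakh"),("June", "Ashadh")] from by decide, List.find?_eq_none]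
          intro x hx
          fin_cases hx
          · rw [lowAD0]; simpa using h12
          · rw [lowAD1]; simpa using h13
          · rw [lowAD2]; simpa using h14
          · rw [lowAD3]; simpa using h15
          · rw [lowAD4]; simpa using h16
          · rw [lowAD5]; simpa using h17
          · rw [lowAD6]; simpa using h18
          · rw [lowAD7]; simpa using h19
          · rw [lowAD8]; simpa using h20
          · rw [lowAD9]; simpa using h21
          · rw [lowAD10]; simpa using h22
          · rw [lowAD11]; simpa using h23
          · rw [lowAD12]; simpa using h24
          · rw [lowAD13]; simpa using h25
          · rw [lowAD14]; simpa using h26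
          · rw [lowAD15]; simpa using h27
          · rw [lowAD16]; simpa using h28
          · rw [lowAD17]; simpa using h29
          · rw [lowAD18]; simpa using h30
          · rw [lowAD19]; simpa using h31
          · rw [lowAD20]; simpa using h32
          · rw [lowAD21]; simpa using h33
          · rw [lowAD22]; simpa using h34
        have hf3 : (PySem.List.enumerate AD_FULL 0).find? (fun p =>
            PySem.Str.lower s == PySem.Str.lower p.2 ||
            PySem.Str.lower s == PySem.Str.slice (PySem.Str.lower p.2) none (some 3)) = none := by
          rw [show PySem.List.enumerate AD_FULL 0 = [((0 : Int), "January"),((1 : Int), "February"),((2 : Int), "March"),((3 : Int), "April"),((4 : Int), "May"),((5 : Int), "June"),((6 : Int), "July"),((7 : Int), "August"),((8 : Int), "September"),((9 : Int), "October"),((10 : Int), "November"),((11 : Int), "December")] from by decide, List.find?_eq_none]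
          intro x hx
          fin_cases hx
          · simp only []
            rw [show PySem.Str.lower "January" = "january" from by decide, show PySem.Str.slice ("january" : String) none (some 3) = "jan" from by decide]
            simp [h30, h18]
          · simp only []
            rw [show PySem.Str.lower "February" = "february" from by decide, show PySem.Str.slice ("february" : String) none (some 3) = "feb" from by decide]
            simp [h31, h19]
          · simp only []
            rw [show PySem.Str.lower "March" = "march" from by decide, show PySem.Str.slice ("march" : String) none (some 3) = "mar" from by decide]
            simp [h32, h20]
          · simp only []
            rw [show PySem.Str.lower "April" = "april" from by decide, show PySem.Str.slice ("april" : String) none (some 3) = "apr" from by decide]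
            simp [h33, h21]
          · simp only []
            rw [show PySem.Str.lower "May" = "may" from by decide, show PySem.Str.slice ("may" : String) none (some 3) = "may" from by decide]
            simp [h22]
          · simp only []
            rw [show PySem.Str.lower "June" = "june" from by decide, show PySem.Str.slice ("june" : String) none (some 3) = "jun" from by decide]
            simp [h34, h23]
          · simp only []
            rw [show PySem.Str.lower "July" = "july" from by decide, show PySem.Str.slice ("july" : String) none (some 3) = "jul" from by decide]
            simp [h24, h12]
          · simp only []
            rw [show PySem.Str.lower "August" = "august" from by decide, show PySem.Str.slice ("august" : String) none (some 3) = "aug" from by decide]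
            simp [h25, h13]
          · simp only []
            rw [show PySem.Str.lower "September" = "september" from by decide, show PySem.Str.slice ("september" : String) none (some 3) = "sep" from by decide]
            simp [h26, h14]
          · simp only []
            rw [show PySem.Str.lower "October" = "october" from by decide, show PySem.Str.slice ("october" : String) none (some 3) = "oct" from by decide]
            simp [h27, h15]
          · simp only []
            rw [show PySem.Str.lower "November" = "november" from by decide, show PySem.Str.slice ("november" : String) none (some 3) = "nov" from by decide]
            simp [h28, h16]
          · simp only []
            rw [show PySem.Str.lower "December" = "december" from by decide, show PySem.Str.slice ("december" : String) none (some 3) = "dec" from by decide]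
            simp [h29, h17]
        rw [hf1, hf2, hf3]

-- ===== VERDICT (by name: the statement is the Claim_ definition above) =====
theorem norm_month_spec : Claim_equal_norm_month := by
  intro m _
  unfold Spec_norm_month norm_month norm_month_alt
  exact core_eq (PySem.Str.strip m)
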